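-- pv_equiv track=rewrite | github.com/reggie-o7/TIP-102 | TIP Unit 2 Problems.py | organize_exhibition
-- ===== SOURCE A (Python) =====
-- def organize_exhibition(collection):
--     ans = []
--     freq = {}
--     for i in collection:
--         freq[i] = freq.get(i,0) + 1
--
--     while any(freq[j] > 0 for j in freq):
--         current_ans = []
--         for j in freq:
--             if freq[j] > 0:
--                 freq[j] -= 1
--                 current_ans.append(j)
--         ans.append(current_ans)
--     return ans
-- ===== SOURCE B (Python) =====
-- def organize_exhibition(collection):
--     freq = {}
--     for x in collection:
--         freq[x] = freq.get(x, 0) + 1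
--     rounds = max(freq.values(), default=0)
--     return [[k for k, c in freq.items() if c > r] for r in range(rounds)]
-- ===== Notes on version B (the rewrite author's own statement) =====
-- stated objective: simpler
-- what changed: Replaces A's destructive while-loop that repeatedly decrements a mutable counter dict and rescans it until all counts hit zero with a direct closed-form construction: count once, then round r is simply the keys whose count exceeds r.
import Mathlib
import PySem

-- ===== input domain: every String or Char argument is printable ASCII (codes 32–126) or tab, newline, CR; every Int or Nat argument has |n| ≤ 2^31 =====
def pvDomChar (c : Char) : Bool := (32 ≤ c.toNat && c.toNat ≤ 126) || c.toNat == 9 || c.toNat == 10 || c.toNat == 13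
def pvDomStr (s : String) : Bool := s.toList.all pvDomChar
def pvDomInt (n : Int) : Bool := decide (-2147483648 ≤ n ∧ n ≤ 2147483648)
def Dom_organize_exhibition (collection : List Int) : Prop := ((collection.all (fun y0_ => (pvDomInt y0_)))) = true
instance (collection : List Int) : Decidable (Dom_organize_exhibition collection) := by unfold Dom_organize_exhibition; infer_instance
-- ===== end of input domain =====

-- B replaces A's destructive decrement-and-rescan while-loop over a mutable counter dict by a
-- direct construction (round r = keys whose count exceeds r); objective: simpler, same asymptotic cost.

-- ===== PORT A =====
-- the while loop of A; fuel (collection.length + 1, always sufficient) only makes it total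
def oeLoopA : Nat → PySem.Dict Int Int → List (List Int) → List (List Int)
  | 0, _, ans => ans
  | fuel + 1, freq, ans =>
    if freq.keys.any (fun j => decide (0 < freq.getD j 0)) then
      let st := freq.keys.foldl
        (fun (st : PySem.Dict Int Int × List Int) j =>
          if 0 < st.1.getD j 0 then (st.1.insert j (st.1.getD j 0 - 1), st.2 ++ [j]) else st)
        (freq, [])
      oeLoopA fuel st.1 (ans ++ [st.2])
    else ans

def organize_exhibition (collection : List Int) : List (List Int) :=
  let freq := collection.foldl (fun d i => d.insert i (d.getD i 0 + 1)) PySem.Dict.empty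
  oeLoopA (collection.length + 1) freq []

-- ===== PORT B =====
def organize_exhibition_alt (collection : List Int) : List (List Int) :=
  let freq := collection.foldl (fun d x => d.insert x (d.getD x 0 + 1)) PySem.Dict.empty
  let rounds := (PySem.List.max? freq.values (fun v => v)).getD 0
  (PySem.List.pyRange 0 rounds 1).map
    (fun r => (freq.items.filter (fun p => decide (r < p.2))).map (fun p => p.1))

-- ===== PRECONDITION & SPEC =====
def Spec_organize_exhibition (collection : List Int) (out : List (List Int)) : Prop := out = organize_exhibition_alt collection
instance (collection : List Int) (out : List (List Int)) : Decidable (Spec_organize_exhibition collection out) := by unfold Spec_organize_exhibition; infer_instance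

-- ===== CLAIM (what is proved, stated in full; the proofs are below) =====
def Claim_equal_organize_exhibition : Prop := ∀ (collection : List Int), Dom_organize_exhibition collection → Spec_organize_exhibition collection (organize_exhibition collection)

-- ===== LEMMAS AND PROOFS =====

-- one round of decrementing, at the items level
def oeDec (p : Int × Int) : Int × Int := (p.1, if 0 < p.2 then p.2 - 1 else p.2)

-- running max of the values, as A's loop count
def oeMaxV (items : List (Int × Int)) : Int := (items.map (fun p => p.2)).foldl max 0

theorem oe_map_if_not_mem (l : List (Int × Int)) (k : Int) (q : Int × Int)
    (h : k ∉ l.map (fun p => p.1)) :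
    l.map (fun p => if p.1 == k then q else p) = l := by
  induction l with
  | nil => rfl
  | cons p t ih =>
    simp only [List.map_cons, List.mem_cons, not_or] at h ⊢
    rw [if_neg (by simpa using (Ne.symm h.1)), ih h.2]

theorem oe_foldl_max_le (l : List Int) (a b : Int) (ha : a ≤ b) (h : ∀ x ∈ l, x ≤ b) :
    l.foldl max a ≤ b := by
  induction l generalizing a with
  | nil => exact ha
  | cons x t ih =>
    exact ih (max a x) (max_le ha (h x (by simp))) (fun y hy => h y (by simp [hy]))

theorem oe_maxV_nonneg (items : List (Int × Int)) : 0 ≤ oeMaxV items :=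
  (PySem.List.le_foldl_max _ _).1

theorem oe_maxV_le (items : List (Int × Int)) (b : Int) (hb : 0 ≤ b)
    (h : ∀ p ∈ items, p.2 ≤ b) : oeMaxV items ≤ b := by
  refine oe_foldl_max_le _ _ _ hb ?_
  intro x hx
  rcases List.mem_map.1 hx with ⟨p, hp, rfl⟩
  exact h p hp

theorem oe_mem_maxV (items : List (Int × Int)) (h : 0 < oeMaxV items) :
    ∃ p ∈ items, p.2 = oeMaxV items := by
  rcases PySem.List.foldl_max_mem (items.map (fun p => p.2)) 0 with h0 | hmem
  · rw [show (items.map (fun p => p.2)).foldl max 0 = oeMaxV items from rfl] at h0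
    omega
  · rcases List.mem_map.1 hmem with ⟨p, hp, hv⟩
    exact ⟨p, hp, hv⟩

theorem oe_le_maxV (items : List (Int × Int)) (p : Int × Int) (hp : p ∈ items) :
    p.2 ≤ oeMaxV items :=
  (PySem.List.le_foldl_max _ _).2 _ (List.mem_map.2 ⟨p, hp, rfl⟩)

theorem oe_map_fst_dec (items : List (Int × Int)) :
    (items.map oeDec).map (fun p => p.1) = items.map (fun p => p.1) := by
  simp [oeDec, List.map_map, Function.comp]

theorem oe_dec_nonneg (items : List (Int × Int)) (h : ∀ p ∈ items, 0 ≤ p.2) :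
    ∀ p ∈ items.map oeDec, 0 ≤ p.2 := by
  intro p hp
  rcases List.mem_map.1 hp with ⟨q, hq, rfl⟩
  have := h q hq
  simp only [oeDec]
  split <;> omega

theorem oe_maxV_dec (items : List (Int × Int)) (h0 : ∀ p ∈ items, 0 ≤ p.2)
    (hpos : 0 < oeMaxV items) : oeMaxV (items.map oeDec) = oeMaxV items - 1 := by
  refine le_antisymm ?_ ?_
  · refine oe_maxV_le _ _ (by omega) ?_
    intro p hp
    rcases List.mem_map.1 hp with ⟨q, hq, rfl⟩
    have h1 := h0 q hq
    have h2 := oe_le_maxV items q hq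
    simp only [oeDec]
    split <;> omega
  · rcases oe_mem_maxV items hpos with ⟨p, hp, hv⟩
    have := oe_le_maxV (items.map oeDec) (oeDec p) (List.mem_map.2 ⟨p, hp, rfl⟩)
    simp only [oeDec, hv, if_pos hpos] at this
    omega

theorem oe_round_shift (items : List (Int × Int)) (r : Int) (hr : 0 ≤ r)
    (h0 : ∀ p ∈ items, 0 ≤ p.2) :
    ((items.map oeDec).filter (fun p => decide (r < p.2))).map (fun p => p.1)
      = (items.filter (fun p => decide (r + 1 < p.2))).map (fun p => p.1) := by
  induction items with
  | nil => rfl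
  | cons p t ih =>
    have hp := h0 p (by simp)
    have ht : ∀ q ∈ t, 0 ≤ q.2 := fun q hq => h0 q (by simp [hq])
    simp only [List.map_cons, List.filter_cons]
    have : (decide (r < (oeDec p).2)) = (decide (r + 1 < p.2)) := by
      simp only [oeDec]
      split <;> simp <;> omega
    rw [this]
    rcases Bool.eq_false_or_eq_true (decide (r + 1 < p.2)) with hb | hb <;>
      simp [hb, ih ht, oeDec]

theorem oe_any_congr {α : Type} (l : List α) (p q : α → Bool)
    (h : ∀ a ∈ l, p a = q a) : l.any p = l.any q := by
  induction l with
  | nil => rfl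
  | cons a t ih =>
    simp only [List.any_cons, h a (by simp),
      ih (fun b hb => h b (by simp [hb]))]

-- the membership condition over the dict equals the values condition over the items
theorem oe_any_cond (items : List (Int × Int)) (hnd : (items.map (fun p => p.1)).Nodup) :
    (PySem.Dict.mk items).keys.any (fun j => decide (0 < (PySem.Dict.mk items).getD j 0))
      = items.any (fun p => decide (0 < p.2)) := by
  have hk : (PySem.Dict.mk items).keys = items.map (fun p => p.1) := rfl
  rw [hk, List.any_map]
  refine oe_any_congr _ _ _ ?_
  intro p hp
  have : (PySem.Dict.mk items).getD p.1 0 = p.2 :=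
    PySem.Dict.getD_of_mem_items (d := PySem.Dict.mk items) (k := p.1) (v := p.2)
      (show (p.1, p.2) ∈ (PySem.Dict.mk items).items from by simpa using hp)
      (show ((PySem.Dict.mk items).keys).Nodup from hnd) 0
  simp [Function.comp, this]

-- the inner for-loop of A, characterised at the items level
theorem oe_inner (post : List (Int × Int)) :
    ∀ (pre : List (Int × Int)) (acc : List Int),
    ((pre ++ post).map (fun p => p.1)).Nodup →
    (post.map (fun p => p.1)).foldl
      (fun (st : PySem.Dict Int Int × List Int) j =>
        if 0 < st.1.getD j 0 then (st.1.insert j (st.1.getD j 0 - 1), st.2 ++ [j]) else st)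
      (PySem.Dict.mk (pre ++ post), acc)
    = (PySem.Dict.mk (pre ++ post.map oeDec),
       acc ++ (post.filter (fun p => decide (0 < p.2))).map (fun p => p.1)) := by
  induction post with
  | nil => intro pre acc _; simp
  | cons p rest ih =>
    intro pre acc hnd
    obtain ⟨k, v⟩ := p
    have hmem : (k, v) ∈ pre ++ (k, v) :: rest := by simp
    have hget : (PySem.Dict.mk (pre ++ (k, v) :: rest)).getD k 0 = v :=
      PySem.Dict.getD_of_mem_items (d := PySem.Dict.mk (pre ++ (k, v) :: rest))
        (show (k, v) ∈ (PySem.Dict.mk (pre ++ (k, v) :: rest)).items from hmem)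
        (show ((PySem.Dict.mk (pre ++ (k, v) :: rest)).keys).Nodup from hnd) 0
    have hkpre : k ∉ pre.map (fun p => p.1) := by
      have h := hnd
      rw [List.map_append] at h
      intro hk
      exact (List.disjoint_of_nodup_append h) hk (by simp)
    have hkrest : k ∉ rest.map (fun p => p.1) := by
      have h := hnd
      rw [List.map_append, List.map_cons] at h
      exact (List.nodup_cons.1 h.of_append_right).1
    have hnd' : ((pre ++ (k, v - 1) :: rest).map (fun p => p.1)).Nodup := by
      simpa using hnd
    simp only [List.map_cons, List.foldl_cons, hget]
    by_cases hv : 0 < v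
    · rw [if_pos hv]
      have hcont : (PySem.Dict.mk (pre ++ (k, v) :: rest)).contains k = true := by
        rw [PySem.Dict.contains_eq_decide_mem_keys]
        simp [PySem.Dict.keys]
      have hitems :
          ((PySem.Dict.mk (pre ++ (k, v) :: rest)).insert k (v - 1)).items
            = pre ++ (k, v - 1) :: rest := by
        rw [PySem.Dict.items_insert, if_pos hcont]
        show (pre ++ (k, v) :: rest).map (fun p => if p.1 == k then (k, v - 1) else p) = _
        rw [List.map_append, List.map_cons]
        rw [oe_map_if_not_mem pre k _ hkpre, oe_map_if_not_mem rest k _ hkrest]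
        simp
      have hdict : (PySem.Dict.mk (pre ++ (k, v) :: rest)).insert k (v - 1)
          = PySem.Dict.mk (pre ++ (k, v - 1) :: rest) := PySem.Dict.ext hitems
      rw [hdict]
      have := ih (pre ++ [(k, v - 1)]) (acc ++ [k]) (by simpa using hnd')
      simp only [List.append_assoc, List.singleton_append] at this
      rw [this]
      have hdec : oeDec (k, v) = (k, v - 1) := by simp [oeDec, hv]
      simp [hdec, decide_eq_true hv]
    · rw [if_neg hv]
      have := ih (pre ++ [(k, v)]) acc (by simpa using hnd)
      simp only [List.append_assoc, List.singleton_append] at this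
      rw [this]
      have hdec : oeDec (k, v) = (k, v) := by simp [oeDec, hv]
      have : (decide (0 < v)) = false := decide_eq_false hv
      simp [hdec, this]

theorem oe_loopA_spec (fuel : Nat) :
    ∀ (items : List (Int × Int)) (ans : List (List Int)),
    (items.map (fun p => p.1)).Nodup → (∀ p ∈ items, 0 ≤ p.2) →
    oeMaxV items ≤ (fuel : Int) →
    oeLoopA fuel (PySem.Dict.mk items) ans
      = ans ++ (PySem.List.pyRange 0 (oeMaxV items) 1).map
          (fun r => (items.filter (fun p => decide (r < p.2))).map (fun p => p.1)) := by
  induction fuel with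
  | zero =>
    intro items ans hnd h0 hf
    have : oeMaxV items = 0 := le_antisymm (by exact_mod_cast hf) (oe_maxV_nonneg items)
    simp [oeLoopA, this, PySem.List.pyRange_one_eq_nil]
  | succ n ih =>
    intro items ans hnd h0 hf
    by_cases hm : 0 < oeMaxV items
    · have hcond : (PySem.Dict.mk items).keys.any
          (fun j => decide (0 < (PySem.Dict.mk items).getD j 0)) = true := by
        rw [oe_any_cond items hnd]
        rcases oe_mem_maxV items hm with ⟨p, hp, hv⟩
        exact List.any_eq_true.2 ⟨p, hp, decide_eq_true (by omega)⟩
      have hkeys : (PySem.Dict.mk items).keys = items.map (fun p => p.1) := rfl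
      rw [oeLoopA, if_pos hcond]
      have hinner := oe_inner items [] [] (by simpa using hnd)
      simp only [List.nil_append] at hinner
      rw [hkeys, hinner]
      have hdecnd : ((items.map oeDec).map (fun p => p.1)).Nodup := by
        rw [oe_map_fst_dec]; exact hnd
      have hdec0 := oe_dec_nonneg items h0
      have hmax := oe_maxV_dec items h0 hm
      have hfuel' : oeMaxV (items.map oeDec) ≤ (n : Int) := by
        rw [hmax]; push_cast at hf ⊢; omega
      rw [ih (items.map oeDec) _ hdecnd hdec0 hfuel', hmax]
      rw [PySem.List.pyRange_one_cons hm]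
      simp only [zero_add]
      have hrange : PySem.List.pyRange 1 (oeMaxV items) 1
          = (PySem.List.pyRange 0 (oeMaxV items - 1) 1).map (fun r => r + 1) := by
        rw [PySem.List.pyRange_one, PySem.List.pyRange_one]
        simp only [List.map_map]
        have : oeMaxV items - 1 - 0 = oeMaxV items - 1 := by ring
        rw [this]
        refine List.map_congr_left ?_
        intro k _
        simp [Function.comp]; ring
      rw [hrange, List.map_cons, List.map_map]
      have hshift : ∀ r ∈ PySem.List.pyRange 0 (oeMaxV items - 1) 1,
          (((items.map oeDec).filter (fun p => decide (r < p.2))).map (fun p => p.1))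
            = ((items.filter (fun p => decide (r + 1 < p.2))).map (fun p => p.1)) := by
        intro r hr
        have hr0 : 0 ≤ r := (PySem.List.mem_pyRange_one.1 hr).1
        exact oe_round_shift items r hr0 h0
      have : ((PySem.List.pyRange 0 (oeMaxV items - 1) 1).map
          ((fun r => (items.filter (fun p => decide (r < p.2))).map (fun p => p.1)) ∘ (fun r => r + 1)))
          = (PySem.List.pyRange 0 (oeMaxV items - 1) 1).map
            (fun r => ((items.map oeDec).filter (fun p => decide (r < p.2))).map (fun p => p.1)) := by
        refine List.map_congr_left ?_
        intro r hr
        simp only [Function.comp]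
        exact (hshift r hr).symm
      rw [this]
      simp
    · have hmz : oeMaxV items = 0 := le_antisymm (by omega) (oe_maxV_nonneg items)
      have hcond : items.any (fun p => decide (0 < p.2)) = false := by
        refine List.any_eq_false.mpr ?_
        intro p hp
        have h1 := oe_le_maxV items p hp
        rw [hmz] at h1
        have h2 : ¬ 0 < p.2 := by omega
        simpa using h2
      rw [oeLoopA, if_neg (by rw [oe_any_cond items hnd]; simp [hcond])]
      simp [hmz, PySem.List.pyRange_one_eq_nil]

theorem oe_maxD_eq (vals : List Int) (h : ∀ v ∈ vals, 0 ≤ v) :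
    (PySem.List.max? vals (fun v => v)).getD 0 = vals.foldl max 0 := by
  cases vals with
  | nil => simp [PySem.List.max?]
  | cons v t =>
    rw [PySem.List.max?_id_cons]
    have hv : 0 ≤ v := h v (by simp)
    simp only [Option.getD_some, List.foldl_cons]
    rw [max_eq_right hv]

-- ===== VERDICT (by name: the statement is the Claim_ definition above) =====
theorem organize_exhibition_spec : Claim_equal_organize_exhibition := by
  intro collection _
  unfold Spec_organize_exhibition organize_exhibition organize_exhibition_alt
  rw [PySem.Dict.foldl_insert_getD_add_one_eq_counter]
  set items := (PySem.Dict.counter collection).items with hitems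
  have hmk : PySem.Dict.counter collection = PySem.Dict.mk items := PySem.Dict.ext rfl
  have hnd : (items.map (fun p => p.1)).Nodup := PySem.Dict.nodup_keys_counter collection
  have h0 : ∀ p ∈ items, 0 ≤ p.2 := by
    intro p hp
    rw [hitems, PySem.Dict.items_counter] at hp
    rcases List.mem_map.1 hp with ⟨k, _, rfl⟩
    positivity
  have hvals : (PySem.Dict.counter collection).values = items.map (fun p => p.2) := rfl
  have hmax : (PySem.List.max? ((PySem.Dict.counter collection).values) (fun v => v)).getD 0
      = oeMaxV items := by
    rw [hvals, oe_maxD_eq]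
    · rfl
    · intro v hv
      rcases List.mem_map.1 hv with ⟨p, hp, rfl⟩
      exact h0 p hp
  have hfuel : oeMaxV items ≤ ((collection.length + 1 : Nat) : Int) := by
    refine oe_maxV_le _ _ (by positivity) ?_
    intro p hp
    rw [hitems, PySem.Dict.items_counter] at hp
    rcases List.mem_map.1 hp with ⟨k, _, rfl⟩
    have := List.count_le_length (l := collection) (a := k)
    push_cast
    omega
  rw [hmk] at hmax
  rw [hmk, oe_loopA_spec (collection.length + 1) items [] hnd h0 hfuel]
  simp only [List.nil_append]
  rw [← hmax]
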